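-- pv_equiv track=rewrite | github.com/arin17bishwa/myCP_sols | HackerEarth/solitary-string.py | func
-- ===== SOURCE A (Python) =====
-- def func(s: str) -> int:
--     first_occ: dict[str, int] = {}
--     ans = -1
--     for idx, ch in enumerate(s):
--         if ch in first_occ:
--             ans = max(ans, idx - first_occ[ch] - 1)
--         else:
--             first_occ[ch] = idx
--     return ans
-- ===== SOURCE B (Python) =====
-- def func(s: str) -> int:
--     first: dict[str, int] = {}
--     last: dict[str, int] = {}
--     for i, ch in enumerate(s):
--         first.setdefault(ch, i)
--         last[ch] = i
--     return max((last[c] - f - 1 for c, f in first.items()), default=-1)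
-- ===== Notes on version B (the rewrite author's own statement) =====
-- stated objective: alternative
-- what changed: A keeps a running max updated with a dict lookup at every repeat occurrence during the scan; B decomposes the task into indexing (one pass building first- and last-occurrence dicts via setdefault/overwrite, with no max logic in the loop) followed by a separate reduction max(last[c]-first[c]-1 over first.items(), default=-1).
import Mathlib
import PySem

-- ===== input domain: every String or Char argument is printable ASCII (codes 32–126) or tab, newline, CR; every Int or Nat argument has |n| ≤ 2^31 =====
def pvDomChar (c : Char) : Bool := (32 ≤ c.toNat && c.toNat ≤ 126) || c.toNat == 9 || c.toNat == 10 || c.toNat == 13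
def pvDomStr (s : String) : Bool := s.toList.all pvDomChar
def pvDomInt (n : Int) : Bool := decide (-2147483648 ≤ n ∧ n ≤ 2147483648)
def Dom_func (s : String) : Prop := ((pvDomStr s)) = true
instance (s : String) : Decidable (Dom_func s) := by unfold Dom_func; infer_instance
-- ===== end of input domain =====

-- B replaces A's running-max-during-scan with an index-then-reduce decomposition (same O(n) cost).

-- ===== PORT A =====
-- A's loop: running max over repeat occurrences, first-occurrence dict built as it scans.
def stepA (st : PySem.Dict Char Int × Int) (p : Int × Char) : PySem.Dict Char Int × Int :=
  if st.1.contains p.2 then (st.1, max st.2 (p.1 - st.1.getD p.2 0 - 1))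
  else (st.1.insert p.2 p.1, st.2)

def runA (xs : List Char) : PySem.Dict Char Int × Int :=
  (PySem.List.enumerate xs 0).foldl stepA (PySem.Dict.empty, -1)

def func (s : String) : Int := (runA s.toList).2

-- ===== PORT B =====
-- B's loop: build first- and last-occurrence dicts only; then a separate max-reduction.
def stepB (st : PySem.Dict Char Int × PySem.Dict Char Int) (p : Int × Char) :
    PySem.Dict Char Int × PySem.Dict Char Int :=
  (st.1.setdefault p.2 p.1, st.2.insert p.2 p.1)

def runB (xs : List Char) : PySem.Dict Char Int × PySem.Dict Char Int :=
  (PySem.List.enumerate xs 0).foldl stepB (PySem.Dict.empty, PySem.Dict.empty)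

-- max((last[c] - f - 1 for c, f in items), default=-1); last[c] always present, so getD is exact here.
def aggF (last : PySem.Dict Char Int) (items : List (Char × Int)) (acc : Int) : Int :=
  items.foldl (fun a q => max a (last.getD q.1 0 - q.2 - 1)) acc

def func_alt (s : String) : Int :=
  let fl := runB s.toList
  aggF fl.2 fl.1.items (-1)

-- ===== PRECONDITION & SPEC =====
def Spec_func (s : String) (out : Int) : Prop := out = func_alt s
instance (s : String) (out : Int) : Decidable (Spec_func s out) := by unfold Spec_func; infer_instance

-- ===== CLAIM (what is proved, stated in full; the proofs are below) =====
def Claim_equal_func : Prop := ∀ (s : String), Dom_func s → Spec_func s (func s)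

-- ===== LEMMAS AND PROOFS =====

lemma aggF_max (L : PySem.Dict Char Int) (items : List (Char × Int)) (t y : Int) :
    aggF L items (max t y) = max (aggF L items t) y := by
  induction items generalizing t with
  | nil => rfl
  | cons q r ih =>
      simp only [aggF, List.foldl_cons] at *
      rw [show max (max t y) (L.getD q.1 0 - q.2 - 1)
            = max (max t (L.getD q.1 0 - q.2 - 1)) y by omega]
      exact ih _

lemma le_aggF (L : PySem.Dict Char Int) (items : List (Char × Int)) (t : Int) :
    t ≤ aggF L items t := by
  have h := aggF_max L items t t
  simp at h
  omega

lemma aggF_insert_not_mem (L : PySem.Dict Char Int) (items : List (Char × Int))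
    (c : Char) (n acc : Int) (hc : c ∉ items.map (·.1)) :
    aggF (L.insert c n) items acc = aggF L items acc := by
  induction items generalizing acc with
  | nil => rfl
  | cons q r ih =>
      simp only [List.map_cons, List.mem_cons, not_or] at hc
      simp only [aggF, List.foldl_cons] at *
      rw [PySem.Dict.getD_insert_of_ne _ _ _ (Ne.symm hc.1)]
      exact ih _ hc.2

lemma aggF_insert_mem (L : PySem.Dict Char Int) (items : List (Char × Int))
    (c : Char) (f n acc : Int) (hmem : (c, f) ∈ items)
    (hnd : (items.map (·.1)).Nodup) (hle : L.getD c 0 ≤ n) :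
    aggF (L.insert c n) items acc = max (aggF L items acc) (n - f - 1) := by
  induction items generalizing acc with
  | nil => simp at hmem
  | cons q r ih =>
      simp only [List.map_cons, List.nodup_cons] at hnd
      rcases List.mem_cons.mp hmem with h | h
      · -- head is (c, f)
        subst h
        have hcr : c ∉ r.map (·.1) := by simpa using hnd.1
        have e1 : aggF (L.insert c n) ((c, f) :: r) acc
            = aggF (L.insert c n) r (max acc (n - f - 1)) := by
          simp [aggF, PySem.Dict.getD_insert_self]
        have e2 : aggF L ((c, f) :: r) acc
            = aggF L r (max acc (L.getD c 0 - f - 1)) := by simp [aggF]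
        rw [e1, e2, aggF_insert_not_mem L r c n _ hcr, aggF_max, aggF_max]
        omega
      · -- (c, f) in tail; head key ≠ c
        have hne : q.1 ≠ c := by
          intro he
          exact hnd.1 (he ▸ (List.mem_map.mpr ⟨(c, f), h, rfl⟩))
        have e1 : aggF (L.insert c n) (q :: r) acc
            = aggF (L.insert c n) r (max acc (L.getD q.1 0 - q.2 - 1)) := by
          simp [aggF, PySem.Dict.getD_insert_of_ne _ _ _ hne]
        have e2 : aggF L (q :: r) acc
            = aggF L r (max acc (L.getD q.1 0 - q.2 - 1)) := by simp [aggF]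
        rw [e1, e2]
        exact ih _ h hnd.2

-- the joint loop invariant of A's scan and B's two index dicts
lemma run_inv (xs : List Char) :
    (runA xs).1 = (runB xs).1 ∧
    (runB xs).1.keys.Nodup ∧
    (∀ c, (runB xs).1.contains c = true →
      ∃ v, (runB xs).2.get? c = some v ∧ v < (xs.length : Int)) ∧
    (runA xs).2 = aggF (runB xs).2 (runB xs).1.items (-1) := by
  induction xs using List.reverseRecOn with
  | nil =>
      refine ⟨rfl, ?_, ?_, rfl⟩
      · exact PySem.Dict.nodup_keys_empty
      · intro c hc; simp [runB, PySem.List.enumerate, PySem.Dict.contains_empty] at hc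
  | append_singleton xs c ih =>
      obtain ⟨hfd, hnd, hlast, hans⟩ := ih
      have hA : runA (xs ++ [c])
          = stepA (runA xs) ((0 + (xs.length : Int), c)) := by
        simp [runA, PySem.List.enumerate_append, PySem.List.enumerate]
      have hB : runB (xs ++ [c])
          = stepB (runB xs) ((0 + (xs.length : Int), c)) := by
        simp [runB, PySem.List.enumerate_append, PySem.List.enumerate]
      set n : Int := (xs.length : Int) with hn
      by_cases hcont : (runB xs).1.contains c = true
      · -- repeat occurrence
        have hcontA : (runA xs).1.contains c = true := by rw [hfd]; exact hcont
        have hstepA : runA (xs ++ [c]) = ((runA xs).1,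
            max (runA xs).2 (0 + n - (runA xs).1.getD c 0 - 1)) := by
          rw [hA]; simp [stepA, hcontA]
        have hstepB : runB (xs ++ [c]) = ((runB xs).1, (runB xs).2.insert c (0 + n)) := by
          rw [hB]; simp [stepB, PySem.Dict.setdefault_of_contains _ _ hcont]
        obtain ⟨v, hv, hvlt⟩ := hlast c hcont
        have hgetDlast : (runB xs).2.getD c 0 = v := PySem.Dict.getD_of_get?_eq_some _ _ hv
        -- f := first-occurrence value of c
        obtain ⟨f, hf⟩ : ∃ f, (runB xs).1.get? c = some f := by
          rcases h : (runB xs).1.get? c with _ | f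
          · rw [PySem.Dict.get?_eq_none_iff_contains] at h
            rw [h] at hcont; simp at hcont
          · exact ⟨f, rfl⟩
        have hfmem : (c, f) ∈ (runB xs).1.items := PySem.Dict.mem_items_of_get?_eq_some _ hf
        have hfgD : (runA xs).1.getD c 0 = f := by
          rw [hfd]; exact PySem.Dict.getD_of_get?_eq_some _ _ hf
        refine ⟨?_, ?_, ?_, ?_⟩
        · rw [hstepA, hstepB, hfd]
        · rw [hstepB]; exact hnd
        · intro c' hc'
          rw [hstepB] at hc' ⊢
          simp only
          by_cases hcc : c' = c
          · subst hcc
            exact ⟨0 + n, PySem.Dict.get?_insert_self _ _ _, by simp; omega⟩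
          · obtain ⟨v', hv', hv'lt⟩ := hlast c' hc'
            exact ⟨v', by rw [PySem.Dict.get?_insert_of_ne _ _ hcc] ; exact hv',
              by simp; omega⟩
        · rw [hstepA, hstepB]
          simp only
          have hkeysnd : ((runB xs).1.items.map (·.1)).Nodup := hnd
          rw [aggF_insert_mem (runB xs).2 (runB xs).1.items c f (0 + n) (-1) hfmem hkeysnd
              (by rw [hgetDlast]; omega)]
          rw [hans, hfgD]
      · -- first occurrence of c
        have hcontA : (runA xs).1.contains c = false := by
          rw [hfd]; exact eq_false_of_ne_true hcont
        have hstepA : runA (xs ++ [c]) = ((runA xs).1.insert c (0 + n), (runA xs).2) := by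
          rw [hA]; simp [stepA, hcontA]
        have hstepB : runB (xs ++ [c])
            = ((runB xs).1.insert c (0 + n), (runB xs).2.insert c (0 + n)) := by
          rw [hB]
          simp [stepB, PySem.Dict.setdefault_of_not_contains _ _ (eq_false_of_ne_true hcont)]
        have hcnotmem : c ∉ (runB xs).1.items.map (·.1) := by
          intro hmem
          exact hcont ((PySem.Dict.contains_iff_mem_keys _ _).mpr hmem)
        refine ⟨?_, ?_, ?_, ?_⟩
        · rw [hstepA, hstepB, hfd]
        · rw [hstepB]; exact PySem.Dict.nodup_keys_insert _ _ _ hnd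
        · intro c' hc'
          rw [hstepB] at hc' ⊢
          simp only
          by_cases hcc : c' = c
          · subst hcc
            exact ⟨0 + n, PySem.Dict.get?_insert_self _ _ _, by simp; omega⟩
          · simp only [PySem.Dict.contains_insert] at hc'
            have : (runB xs).1.contains c' = true := by
              rcases Bool.or_eq_true_iff.mp hc' with h | h
              · exact absurd (by simpa using h) hcc
              · exact h
            obtain ⟨v', hv', hv'lt⟩ := hlast c' this
            exact ⟨v', by rw [PySem.Dict.get?_insert_of_ne _ _ hcc]; exact hv',
              by simp; omega⟩
        · rw [hstepA, hstepB]
          simp only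
          rw [PySem.Dict.items_insert_of_not_contains _ _ (eq_false_of_ne_true hcont)]
          unfold aggF
          rw [List.foldl_append]
          simp only [List.foldl_cons, List.foldl_nil]
          rw [show ((runB xs).1.items.foldl
                (fun a q => max a (((runB xs).2.insert c (0 + n)).getD q.1 0 - q.2 - 1)) (-1))
              = aggF ((runB xs).2.insert c (0 + n)) (runB xs).1.items (-1) from rfl]
          rw [aggF_insert_not_mem _ _ _ _ _ hcnotmem]
          rw [PySem.Dict.getD_insert_self]
          have hle := le_aggF (runB xs).2 (runB xs).1.items (-1)
          rw [hans]
          omega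

-- ===== VERDICT (by name: the statement is the Claim_ definition above) =====
theorem func_spec : Claim_equal_func := by
  intro s _
  unfold Spec_func func func_alt
  exact (run_inv s.toList).2.2.2
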